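-- pv_equiv track=rewrite | github.com/nlesc-sherlock/cluster-analysis | scripts/cluster.py | false_negatives
-- ===== SOURCE A (Python) =====
-- import itertools
--
-- def false_negatives(cluster_labels, gt):
--     """ return absolute number of false negatives """
--     fn = 0
--     gt_clusters = {k:[] for k in list(set(gt))}
--     for i in range(len(gt)):
--         gt_clusters[gt[i]].append(i)
--     for k,v in gt_clusters.items():
--         pairs = list(itertools.product(v,v))
--         for p in pairs:
--             if cluster_labels[p[0]]!=cluster_labels[p[1]]:
--                 fn += 1
--     return fn
-- ===== SOURCE B (Python) =====
-- def false_negatives(cluster_labels, gt):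
--     """ return absolute number of false negatives """
--     gsize = {}
--     pcount = {}
--     for g, c in zip(gt, cluster_labels):
--         gsize[g] = gsize.get(g, 0) + 1
--         pcount[(g, c)] = pcount.get((g, c), 0) + 1
--     return sum(m * m for m in gsize.values()) - sum(c * c for c in pcount.values())
-- ===== Notes on version B (the rewrite author's own statement) =====
-- stated objective: faster
-- what changed: Replaces A's per-gt-cluster enumeration of all ordered index pairs (itertools.product) with a single counting pass over zip(gt, cluster_labels) (cluster sizes and (gt,predicted)-pair frequencies), returning sum(m^2) - sum(c^2).
import Mathlib
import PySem

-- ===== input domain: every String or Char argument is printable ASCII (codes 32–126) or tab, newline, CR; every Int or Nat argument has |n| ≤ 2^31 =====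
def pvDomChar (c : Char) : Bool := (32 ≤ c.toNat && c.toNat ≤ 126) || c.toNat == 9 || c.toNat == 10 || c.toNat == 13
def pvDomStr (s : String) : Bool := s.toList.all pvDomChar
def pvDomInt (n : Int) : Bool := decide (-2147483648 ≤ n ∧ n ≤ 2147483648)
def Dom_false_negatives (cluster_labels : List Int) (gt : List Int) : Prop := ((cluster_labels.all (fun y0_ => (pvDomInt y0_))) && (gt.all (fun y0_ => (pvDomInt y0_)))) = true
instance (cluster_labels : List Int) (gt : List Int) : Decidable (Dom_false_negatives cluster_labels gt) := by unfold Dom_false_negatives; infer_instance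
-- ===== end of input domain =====

-- B replaces A's per-gt-cluster enumeration of all ordered index pairs with one counting
-- pass (cluster sizes and (gt,predicted) pair frequencies): sum(m^2) - sum(c^2); faster (asymptotic).

-- ===== PORT A =====
def false_negatives (cluster_labels : List Int) (gt : List Int) : Int :=
  let d0 : PySem.Dict Int (List Int) :=
    (PySem.Set.ofList gt).foldl (fun d k => d.insert k []) PySem.Dict.empty
  let gt_clusters :=
    (PySem.List.pyRange 0 gt.length 1).foldl
      (fun d i => d.modify (PySem.List.pyGetD gt i 0) [] (fun v => v ++ [i])) d0
  gt_clusters.items.foldl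
    (fun fn kv =>
      let pairs := kv.2.flatMap (fun a => kv.2.map (fun b => (a, b)))
      pairs.foldl
        (fun fn p =>
          if PySem.List.pyGetD cluster_labels p.1 0 ≠ PySem.List.pyGetD cluster_labels p.2 0
          then fn + 1 else fn) fn) 0

-- ===== PORT B =====
def false_negatives_alt (cluster_labels : List Int) (gt : List Int) : Int :=
  let st :=
    (gt.zip cluster_labels).foldl
      (fun (st : PySem.Dict Int Int × PySem.Dict (Int × Int) Int) p =>
        (st.1.insert p.1 (st.1.getD p.1 0 + 1), st.2.insert p (st.2.getD p 0 + 1)))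
      (PySem.Dict.empty, PySem.Dict.empty)
  st.1.values.foldl (fun s m => s + m * m) 0 - st.2.values.foldl (fun s c => s + c * c) 0

-- ===== PRECONDITION & SPEC =====
-- Pre_ excludes exactly the inputs where A raises IndexError: cluster_labels shorter than gt.
def Pre_false_negatives (cluster_labels : List Int) (gt : List Int) : Prop :=
  gt.length ≤ cluster_labels.length
instance (cluster_labels : List Int) (gt : List Int) : Decidable (Pre_false_negatives cluster_labels gt) := by unfold Pre_false_negatives; infer_instance
def pvWitness_false_negatives : List Int × List Int := ([1, 2, 1, 2], [7, 7, 7, 8])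

def Spec_false_negatives (cluster_labels : List Int) (gt : List Int) (out : Int) : Prop := out = false_negatives_alt cluster_labels gt
instance (cluster_labels : List Int) (gt : List Int) (out : Int) : Decidable (Spec_false_negatives cluster_labels gt out) := by unfold Spec_false_negatives; infer_instance

-- ===== CLAIM (what is proved, stated in full; the proofs are below) =====
def Claim_equal_false_negatives : Prop := ∀ (cluster_labels : List Int) (gt : List Int), Dom_false_negatives cluster_labels gt → Pre_false_negatives cluster_labels gt → Spec_false_negatives cluster_labels gt (false_negatives cluster_labels gt)
-- ===== LEMMAS AND PROOFS =====

-- proof-only abbreviations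
def pvE (gt : List Int) : List (Int × Int) :=
  (List.range gt.length).map (fun i => ((gt.getD i 0 : Int), (i : Int)))
def pvYs (P : List (Int × Int)) (k : Int) : List Int :=
  (P.filter (fun p => p.1 == k)).map (fun p => p.2)
def pvProd {α : Type} (v : List α) : List (α × α) :=
  v.flatMap (fun a => v.map (fun b => (a, b)))

theorem pvFoldlAddMap {α : Type} (f : α → Int) (l : List α) (a : Int) :
    l.foldl (fun s x => s + f x) a = a + (l.map f).sum := by
  induction l generalizing a with
  | nil => simp
  | cons x xs ih => simp [List.foldl_cons, ih]; ring

theorem pvFoldlIfCount {α : Type} (p : α → Prop) [DecidablePred p] (l : List α) (a : Int) :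
    l.foldl (fun n x => if p x then n + 1 else n) a = a + (l.countP (fun x => decide (p x)) : Int) := by
  induction l generalizing a with
  | nil => simp
  | cons x xs ih =>
    by_cases hx : p x <;> simp [List.foldl_cons, hx, ih] <;> ring

theorem pvFoldlSplitDicts (l : List (Int × Int)) (x : PySem.Dict Int Int)
    (y : PySem.Dict (Int × Int) Int) :
    l.foldl (fun st p => (st.1.insert p.1 (st.1.getD p.1 0 + 1), st.2.insert p (st.2.getD p 0 + 1))) (x, y)
    = (l.foldl (fun d p => d.insert p.1 (d.getD p.1 0 + 1)) x,
       l.foldl (fun d p => d.insert p (d.getD p 0 + 1)) y) := by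
  induction l generalizing x y with
  | nil => rfl
  | cons a t ih => simp [List.foldl_cons, ih]

theorem pvSetUpdateOfSubset {α : Type} [BEq α] [LawfulBEq α] (l : List α) (s : PySem.Set α)
    (h : ∀ x ∈ l, x ∈ s) : PySem.Set.update s l = s := by
  induction l generalizing s with
  | nil => rfl
  | cons x t ih =>
    have hx : x ∈ s := h x (by simp)
    have hadd : PySem.Set.add s x = s := by
      simp [PySem.Set.add, PySem.Set.contains, hx]
    simp only [PySem.Set.update, List.foldl_cons] at *
    rw [hadd]
    exact ih s (fun y hy => h y (by simp [hy]))

theorem pvSumMapSubInt {α : Type} (c : Int) (f : α → Int) (l : List α) :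
    (l.map (fun a => c - f a)).sum = (l.length : Int) * c - (l.map f).sum := by
  induction l with
  | nil => simp
  | cons x t ih => simp [ih]; ring

theorem pvProdCountTransport {α : Type} (v : List α) (f : α → Int) :
    (pvProd v).countP (fun q => decide (f q.1 ≠ f q.2))
    = (pvProd (v.map f)).countP (fun q => decide (q.1 ≠ q.2)) := by
  unfold pvProd
  rw [List.countP_flatMap, List.countP_flatMap, List.map_map]
  apply congrArg
  apply List.map_congr_left
  intro a _
  simp [Function.comp_def, List.countP_map]

theorem pvOfListMapSum {α : Type} [BEq α] [LawfulBEq α] [DecidableEq α] (l : List α) (g : α → Int) :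
    ((PySem.Set.ofList l).map g).sum = ∑ x ∈ l.toFinset, g x := by
  have nd := PySem.Set.nodup_ofList l
  rw [← List.sum_toFinset g nd]
  congr 1
  ext x
  simp [PySem.Set.mem_ofList]

theorem pvCountDiffPairs (ys : List Int) :
    (((pvProd ys).countP (fun q => decide (q.1 ≠ q.2)) : Nat) : Int)
    = (ys.length : Int) * ys.length - ∑ c ∈ ys.toFinset, (ys.count c : Int) * ys.count c := by
  unfold pvProd
  rw [List.countP_flatMap]
  have step1 : (List.map (List.countP (fun q => decide (q.1 ≠ q.2)) ∘ fun a => ys.map (fun b => (a, b))) ys)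
      = ys.map (fun a => ys.length - ys.count a) := by
    apply List.map_congr_left
    intro a _
    simp only [Function.comp_def, List.countP_map]
    have h2 := List.length_eq_countP_add_countP (fun b => b == a) (l := ys)
    have heq : List.countP (fun x => decide (a ≠ x)) ys
        = List.countP (fun b => decide ¬(b == a) = true) ys := by
      apply List.countP_congr
      intro b _
      rcases eq_or_ne a b with rfl | hne
      · simp
      · simp [hne, Ne.symm hne]
    rw [heq, List.count]
    omega
  rw [step1]
  have step2 : ((ys.map (fun a => ys.length - ys.count a)).sum : Int)
      = (ys.map (fun a => (ys.length : Int) - (ys.count a : Int))).sum := by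
    rw [Nat.cast_list_sum, List.map_map]
    apply congrArg
    apply List.map_congr_left
    intro a _
    simp only [Function.comp_def]
    have := List.count_le_length (a := a) (l := ys)
    omega
  rw [step2, pvSumMapSubInt]
  congr 1
  rw [Finset.sum_list_map_count]
  apply Finset.sum_congr rfl
  intro c _
  simp

theorem pvZipEqMapRange (gt cl : List Int) (h : gt.length ≤ cl.length) :
    gt.zip cl = (List.range gt.length).map (fun i => (gt.getD i 0, cl.getD i 0)) := by
  apply List.ext_getElem
  · simp [List.length_zip]; omega
  · intro i h1 h2
    simp only [List.length_zip] at h1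
    have hi : i < gt.length := by omega
    have hi' : i < cl.length := by omega
    simp only [List.getElem_zip, List.getElem_map, List.getElem_range]
    rw [List.getD_eq_getElem _ _ hi, List.getD_eq_getElem _ _ hi']

theorem pvMemYs (P : List (Int × Int)) (k c : Int) :
    c ∈ pvYs P k ↔ (k, c) ∈ P := by
  unfold pvYs
  simp only [List.mem_map, List.mem_filter]
  constructor
  · rintro ⟨⟨a, b⟩, ⟨hp, hk⟩, rfl⟩
    simp only [beq_iff_eq] at hk
    subst hk; exact hp
  · intro hp
    exact ⟨(k, c), ⟨hp, by simp⟩, rfl⟩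

theorem pvCountYs (P : List (Int × Int)) (k c : Int) :
    (pvYs P k).count c = P.count (k, c) := by
  unfold pvYs
  rw [List.count, List.count, List.countP_map, List.countP_filter]
  apply List.countP_congr
  rintro ⟨a, b⟩ _
  simp only [Function.comp_def, beq_iff_eq, Prod.mk.injEq, Bool.and_comm]
  rcases eq_or_ne a k with rfl | ha
  · rcases eq_or_ne b c with rfl | hb
    · simp
    · simp [hb]
  · simp [ha]

theorem pvFiberSum (gt cl : List Int) :
    ∑ q ∈ (gt.zip cl).toFinset, ((gt.zip cl).count q : Int) * (gt.zip cl).count q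
    = ∑ k ∈ gt.toFinset, ∑ c ∈ (pvYs (gt.zip cl) k).toFinset,
        ((pvYs (gt.zip cl) k).count c : Int) * (pvYs (gt.zip cl) k).count c := by
  set P := gt.zip cl with hP
  have hmaps : ∀ q ∈ P.toFinset, q.1 ∈ gt.toFinset := by
    intro q hq
    simp only [List.mem_toFinset] at hq ⊢
    exact (List.of_mem_zip hq).1
  rw [← Finset.sum_fiberwise_of_maps_to hmaps (fun q => (P.count q : Int) * P.count q)]
  apply Finset.sum_congr rfl
  intro k _
  have himg : (P.toFinset.filter (fun q => q.1 = k))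
      = (pvYs P k).toFinset.image (fun c => (k, c)) := by
    ext ⟨a, b⟩
    simp only [Finset.mem_filter, Finset.mem_image, List.mem_toFinset, pvMemYs]
    constructor
    · rintro ⟨hab, rfl⟩; exact ⟨b, hab, rfl⟩
    · rintro ⟨c, hc, hcd⟩
      cases hcd
      exact ⟨hc, rfl⟩
  rw [himg, Finset.sum_image (by intro x _ y _ hxy; simpa using hxy)]
  apply Finset.sum_congr rfl
  intro c _
  rw [pvCountYs]

theorem pvAChar (cluster_labels gt : List Int) :
    false_negatives cluster_labels gt
    = ((PySem.Set.ofList gt).map (fun k =>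
        ((pvProd (pvYs (pvE gt) k)).countP
          (fun q => decide (PySem.List.pyGetD cluster_labels q.1 0 ≠ PySem.List.pyGetD cluster_labels q.2 0)) : Int))).sum := by
  set S := PySem.Set.ofList gt with hS
  set d0 : PySem.Dict Int (List Int) := S.foldl (fun d k => d.insert k []) PySem.Dict.empty with hd0
  have hitems0 : d0.items = S.map (fun k => (k, ([] : List Int))) := by
    have h := PySem.Dict.items_foldl_insert_fresh (ν := List Int) S (fun k => k) (fun _ => ([] : List Int))
      PySem.Dict.empty (fun a _ => PySem.Dict.contains_empty a) (by simp [hS])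
    simpa using h
  have hkeys0 : d0.keys = S := by
    simp only [PySem.Dict.keys, hitems0, List.map_map]
    rw [show ((fun p : Int × List Int => p.1) ∘ fun k => (k, ([] : List Int))) = fun k => k from rfl]
    exact List.map_id' S
  have hnd0 : d0.keys.Nodup := by rw [hkeys0]; exact PySem.Set.nodup_ofList gt
  have hgetD0 : ∀ c, d0.getD c [] = [] := by
    intro c
    by_cases hc : c ∈ S
    · exact PySem.Dict.getD_of_mem_items d0 (by rw [hitems0]; exact List.mem_map_of_mem hc) hnd0 []
    · apply PySem.Dict.getD_of_not_contains
      have h1 := PySem.Dict.contains_iff_mem_keys d0 c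
      rw [hkeys0] at h1
      exact Bool.eq_false_iff.mpr (fun ht => hc (h1.mp ht))
  have hfold : (PySem.List.pyRange 0 gt.length 1).foldl
      (fun d i => d.modify (PySem.List.pyGetD gt i 0) [] (fun v => v ++ [i])) d0
      = (pvE gt).foldl (fun d p => d.modify p.1 [] (fun v => v ++ [p.2])) d0 := by
    rw [PySem.List.pyRange_zero_natCast, List.foldl_map]
    unfold pvE
    rw [List.foldl_map]
    simp only [PySem.List.pyGetD_natCast]
  set gcl := (pvE gt).foldl (fun d p => d.modify p.1 [] (fun v => v ++ [p.2])) d0 with hgcl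
  have hkeysg : gcl.keys = S := by
    rw [hgcl, PySem.Dict.keys_foldl_modify_key (pvE gt) Prod.fst [] (fun _ p => (fun v => v ++ [p.2])) d0, hkeys0]
    apply pvSetUpdateOfSubset
    intro x hx
    rcases List.mem_map.mp hx with ⟨p, hp, rfl⟩
    rcases List.mem_map.mp hp with ⟨i, hi, rfl⟩
    have hilt : i < gt.length := List.mem_range.mp hi
    rw [hS, PySem.Set.mem_ofList, List.getD_eq_getElem _ _ hilt]
    exact List.getElem_mem hilt
  have hndg : gcl.keys.Nodup := by
    rw [hgcl]
    exact PySem.Dict.nodup_keys_foldl_modify_key (pvE gt) Prod.fst [] (fun _ p => (fun v => v ++ [p.2])) d0 hnd0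
  have hgetDg : ∀ c, gcl.getD c [] = pvYs (pvE gt) c := by
    intro c
    rw [hgcl, PySem.Dict.getD_foldl_modify_append (pvE gt) d0 c, hgetD0]
    rfl
  have hitemsg : gcl.items = S.map (fun k => (k, pvYs (pvE gt) k)) := by
    rw [PySem.Dict.items_eq_map_keys gcl hndg [], hkeysg]
    apply List.map_congr_left
    intro k _
    rw [hgetDg k]
  have h0 : false_negatives cluster_labels gt =
      ((PySem.List.pyRange 0 gt.length 1).foldl
        (fun d i => d.modify (PySem.List.pyGetD gt i 0) [] (fun v => v ++ [i])) d0).items.foldl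
        (fun fn kv =>
          (kv.2.flatMap (fun a => kv.2.map (fun b => (a, b)))).foldl
            (fun fn p => if PySem.List.pyGetD cluster_labels p.1 0 ≠ PySem.List.pyGetD cluster_labels p.2 0
              then fn + 1 else fn) fn) 0 := rfl
  rw [h0, hfold, hitemsg]
  simp only [pvFoldlIfCount]
  rw [pvFoldlAddMap, List.map_map]
  simp [Function.comp_def, pvProd]

theorem pvYsEq (cluster_labels gt : List Int) (h : gt.length ≤ cluster_labels.length) (k : Int) :
    (pvYs (pvE gt) k).map (fun i => PySem.List.pyGetD cluster_labels i 0)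
    = pvYs (gt.zip cluster_labels) k := by
  unfold pvYs pvE
  rw [pvZipEqMapRange gt cluster_labels h]
  rw [List.filter_map, List.filter_map, List.map_map, List.map_map, List.map_map]
  apply List.map_congr_left
  intro i _
  simp [PySem.List.pyGetD_natCast]

theorem pvLenYs (cluster_labels gt : List Int) (h : gt.length ≤ cluster_labels.length) (k : Int) :
    ((pvYs (gt.zip cluster_labels) k).length : Int) = (gt.count k : Int) := by
  unfold pvYs
  have hcnt : List.count k gt = List.countP (fun p => p.1 == k) (gt.zip cluster_labels) := by
    conv_lhs => rw [← List.map_fst_zip (l₁ := gt) (l₂ := cluster_labels) h]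
    rw [List.count, List.countP_map]
    exact List.countP_congr (fun p _ => Iff.rfl)
  rw [List.length_map, ← List.countP_eq_length_filter, hcnt]

theorem pvCounterValues {κ : Type} [BEq κ] [LawfulBEq κ] (xs : List κ) :
    (PySem.Dict.counter xs).values = (PySem.Set.ofList xs).map (fun k => (xs.count k : Int)) := by
  rw [PySem.Dict.values_eq_map_keys _ (PySem.Dict.nodup_keys_counter xs) 0, PySem.Dict.keys_counter]
  apply List.map_congr_left
  intro k _
  rw [PySem.Dict.getD_counter]

theorem pvBChar (cluster_labels gt : List Int) (h : gt.length ≤ cluster_labels.length) :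
    false_negatives_alt cluster_labels gt
    = (∑ g ∈ gt.toFinset, (gt.count g : Int) * gt.count g)
      - ∑ q ∈ (gt.zip cluster_labels).toFinset,
          ((gt.zip cluster_labels).count q : Int) * (gt.zip cluster_labels).count q := by
  set P := gt.zip cluster_labels with hP
  have h0 : false_negatives_alt cluster_labels gt =
      (P.foldl (fun (st : PySem.Dict Int Int × PySem.Dict (Int × Int) Int) p =>
        (st.1.insert p.1 (st.1.getD p.1 0 + 1), st.2.insert p (st.2.getD p 0 + 1)))
        (PySem.Dict.empty, PySem.Dict.empty)).1.values.foldl (fun s m => s + m * m) 0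
      - (P.foldl (fun (st : PySem.Dict Int Int × PySem.Dict (Int × Int) Int) p =>
        (st.1.insert p.1 (st.1.getD p.1 0 + 1), st.2.insert p (st.2.getD p 0 + 1)))
        (PySem.Dict.empty, PySem.Dict.empty)).2.values.foldl (fun s c => s + c * c) 0 := rfl
  rw [h0, pvFoldlSplitDicts]
  have h1 : P.foldl (fun d p => d.insert p.1 (d.getD p.1 0 + 1)) PySem.Dict.empty
      = PySem.Dict.counter gt :=
    calc P.foldl (fun d p => d.insert p.1 (d.getD p.1 0 + 1)) PySem.Dict.empty
        = (P.map Prod.fst).foldl (fun d x => d.insert x (d.getD x 0 + 1)) PySem.Dict.empty :=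
          (List.foldl_map (f := Prod.fst) (g := fun (d : PySem.Dict Int Int) x => d.insert x (d.getD x 0 + 1))
            (l := P) (init := PySem.Dict.empty)).symm
      _ = PySem.Dict.counter (P.map Prod.fst) :=
          PySem.Dict.foldl_insert_getD_add_one_eq_counter (P.map Prod.fst)
      _ = PySem.Dict.counter gt := by rw [hP, List.map_fst_zip h]
  have h2 : P.foldl (fun d p => d.insert p (d.getD p 0 + 1)) PySem.Dict.empty
      = PySem.Dict.counter P := PySem.Dict.foldl_insert_getD_add_one_eq_counter P
  rw [h1, h2, pvCounterValues gt, pvCounterValues P, pvFoldlAddMap, pvFoldlAddMap,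
    List.map_map, List.map_map]
  rw [show ((fun m : Int => m * m) ∘ fun k => (gt.count k : Int)) = fun k => (gt.count k : Int) * gt.count k from rfl]
  rw [show ((fun c : Int => c * c) ∘ fun q => (P.count q : Int)) = fun q => (P.count q : Int) * P.count q from rfl]
  rw [pvOfListMapSum, pvOfListMapSum]
  ring

-- ===== VERDICT (by name: the statement is the Claim_ definition above) =====
theorem false_negatives_spec : Claim_equal_false_negatives := by
  intro cluster_labels gt _ hpre
  unfold Pre_false_negatives at hpre
  unfold Spec_false_negatives
  rw [pvAChar, pvBChar cluster_labels gt hpre]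
  have hstep : ∀ k, ((pvProd (pvYs (pvE gt) k)).countP
        (fun q => decide (PySem.List.pyGetD cluster_labels q.1 0 ≠ PySem.List.pyGetD cluster_labels q.2 0)) : Int)
      = ((pvProd (pvYs (gt.zip cluster_labels) k)).countP (fun q => decide (q.1 ≠ q.2)) : Int) := by
    intro k
    rw [pvProdCountTransport _ (fun i => PySem.List.pyGetD cluster_labels i 0),
      pvYsEq cluster_labels gt hpre k]
  rw [List.map_congr_left (fun k _ => hstep k), pvOfListMapSum]
  have hpt : ∀ k, ((pvProd (pvYs (gt.zip cluster_labels) k)).countP (fun q => decide (q.1 ≠ q.2)) : Int)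
      = (gt.count k : Int) * gt.count k
        - ∑ c ∈ (pvYs (gt.zip cluster_labels) k).toFinset,
            ((pvYs (gt.zip cluster_labels) k).count c : Int) * (pvYs (gt.zip cluster_labels) k).count c := by
    intro k
    rw [pvCountDiffPairs, pvLenYs cluster_labels gt hpre k]
  rw [Finset.sum_congr rfl (fun k _ => hpt k), Finset.sum_sub_distrib,
    pvFiberSum gt cluster_labels]
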